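-- pv_equiv track=rewrite | github.com/Dark-Light-20/adventJS-2025 | solutions/python/16.py | pack_gifts
-- ===== SOURCE A (Python) =====
-- from typing import Union
--
-- def pack_gifts(gifts: list[int], maxWeight: int) -> Union[int, None]:
--     if not len(gifts):
--         return 0
--     sleighs = 1
--     remain_weight = maxWeight
--     for gift in gifts:
--         if (gift > maxWeight):
--             return None
--         if (gift > remain_weight):
--             sleighs += 1
--             remain_weight = maxWeight
--         remain_weight -= gift
--     return sleighs
-- ===== SOURCE B (Python) =====
-- def pack_gifts(gifts, maxWeight):
--     if any(g > maxWeight for g in gifts):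
--         return None
--     # prefix[k] = total weight of the first k gifts; a sleigh starting at boundary b
--     # extends to the largest j with prefix[j] - prefix[b] <= maxWeight.
--     prefix = [0]
--     for g in gifts:
--         prefix.append(prefix[-1] + g)
--     n = len(gifts)
--     count = 0
--     b = 0
--     while b < n:
--         j = b + 1
--         while j < n and prefix[j + 1] - prefix[b] <= maxWeight:
--             j += 1
--         count += 1
--         b = j
--     return count
-- ===== Notes on version B (the rewrite author's own statement) =====
-- stated objective: alternative
-- what changed: B first validates (any gift over maxWeight -> None), then precomputes a prefix-sum array and counts sleighs by jumping over segment boundaries: from each boundary b it finds the largest j with prefix[j+1]-prefix[b] <= maxWeight and counts one sleigh per jump, replacing A's single pass over a sleigh counter and a mutable remaining-weight register with interleaved validation.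
import Mathlib
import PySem

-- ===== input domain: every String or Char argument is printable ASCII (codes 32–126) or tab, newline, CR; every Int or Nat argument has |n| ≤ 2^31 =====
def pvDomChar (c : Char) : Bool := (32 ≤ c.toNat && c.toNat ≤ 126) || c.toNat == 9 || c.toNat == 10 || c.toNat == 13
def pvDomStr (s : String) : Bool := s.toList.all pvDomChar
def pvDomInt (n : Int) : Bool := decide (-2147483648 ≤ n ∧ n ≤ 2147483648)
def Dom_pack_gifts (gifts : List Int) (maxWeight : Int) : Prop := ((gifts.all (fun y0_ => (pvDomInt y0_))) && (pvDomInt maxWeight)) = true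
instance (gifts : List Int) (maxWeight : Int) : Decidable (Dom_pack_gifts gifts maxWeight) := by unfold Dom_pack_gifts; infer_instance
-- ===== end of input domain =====

-- ===== PORT A =====
-- B replaces A's single counter-and-register loop by a validation pass, a prefix-sum
-- array, and boundary-jumping segment counting (objective: alternative decomposition).
def packGiftsLoop (maxWeight : Int) : List Int → Int → Int → Option Int
  | [], sleighs, _ => some sleighs
  | gift :: rest, sleighs, remain_weight =>
    if gift > maxWeight then none
    else if gift > remain_weight then
      packGiftsLoop maxWeight rest (sleighs + 1) (maxWeight - gift)
    else
      packGiftsLoop maxWeight rest sleighs (remain_weight - gift)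

def pack_gifts (gifts : List Int) (maxWeight : Int) : Option Int :=
  if gifts.length = 0 then some 0
  else packGiftsLoop maxWeight gifts 1 maxWeight

-- ===== PORT B =====
-- prefix.append(prefix[-1] + g): running last value carried as `s`, list built front-to-back
def buildPrefixAux : List Int → Int → List Int
  | [], _ => []
  | g :: gs, s => (s + g) :: buildPrefixAux gs (s + g)

def prefixList (gifts : List Int) : List Int := 0 :: buildPrefixAux gifts 0

-- inner while: advance j while j < n and prefix[j+1] - prefix[b] <= maxWeight
def innerJ (pre : List Int) (n : Nat) (maxW pb : Int) (j : Nat) : Nat :=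
  if h : j < n ∧ pre.getD (j + 1) 0 - pb ≤ maxW then innerJ pre n maxW pb (j + 1) else j
termination_by n - j
decreasing_by omega

-- needed by segCount's termination; cited in its decreasing_by
theorem innerJ_ge (pre : List Int) (n : Nat) (maxW pb : Int) (j : Nat) :
    j ≤ innerJ pre n maxW pb j := by
  rw [innerJ]
  split
  · exact Nat.le_trans (Nat.le_succ j) (innerJ_ge pre n maxW pb (j + 1))
  · exact Nat.le_refl j
termination_by n - j
decreasing_by omega

-- outer while: one sleigh per boundary jump
def segCount (pre : List Int) (n : Nat) (maxW : Int) (b : Nat) (count : Int) : Int :=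
  if h : b < n then
    segCount pre n maxW (innerJ pre n maxW (pre.getD b 0) (b + 1)) (count + 1)
  else count
termination_by n - b
decreasing_by
  have := innerJ_ge pre n maxW (pre.getD b 0) (b + 1)
  omega

def pack_gifts_alt (gifts : List Int) (maxWeight : Int) : Option Int :=
  if gifts.any (fun g => decide (g > maxWeight)) then none
  else some (segCount (prefixList gifts) gifts.length maxWeight 0 0)

-- ===== PRECONDITION & SPEC =====
def Spec_pack_gifts (gifts : List Int) (maxWeight : Int) (out : Option Int) : Prop := out = pack_gifts_alt gifts maxWeight
instance (gifts : List Int) (maxWeight : Int) (out : Option Int) : Decidable (Spec_pack_gifts gifts maxWeight out) := by unfold Spec_pack_gifts; infer_instance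

-- ===== CLAIM (what is proved, stated in full; the proofs are below) =====
def Claim_equal_pack_gifts : Prop := ∀ (gifts : List Int) (maxWeight : Int), Dom_pack_gifts gifts maxWeight → Spec_pack_gifts gifts maxWeight (pack_gifts gifts maxWeight)

-- ===== LEMMAS AND PROOFS =====

theorem packGiftsLoop_none (maxWeight : Int) (gifts : List Int) (sleighs remain : Int)
    (h : ∃ g ∈ gifts, g > maxWeight) :
    packGiftsLoop maxWeight gifts sleighs remain = none := by
  induction gifts generalizing sleighs remain with
  | nil => simp at h
  | cons g gs ih =>
    simp only [packGiftsLoop]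
    by_cases hgm : g > maxWeight
    · simp [hgm]
    · rw [if_neg hgm]
      rcases h with ⟨x, hx, hxm⟩
      rcases List.mem_cons.mp hx with rfl | hx
      · exact absurd hxm hgm
      · split_ifs <;> exact ih _ _ ⟨x, hx, hxm⟩


theorem innerJ_cont (pre : List Int) (n : Nat) (maxW pb : Int) (j : Nat)
    (h : j < n ∧ pre.getD (j + 1) 0 - pb ≤ maxW) :
    innerJ pre n maxW pb j = innerJ pre n maxW pb (j + 1) := by
  conv_lhs => rw [innerJ]
  exact dif_pos h

theorem innerJ_stop (pre : List Int) (n : Nat) (maxW pb : Int) (j : Nat)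
    (h : ¬ (j < n ∧ pre.getD (j + 1) 0 - pb ≤ maxW)) :
    innerJ pre n maxW pb j = j := by
  conv_lhs => rw [innerJ]
  exact dif_neg h

theorem segCount_pos (pre : List Int) (n : Nat) (maxW : Int) (b : Nat) (c : Int)
    (h : b < n) :
    segCount pre n maxW b c
      = segCount pre n maxW (innerJ pre n maxW (pre.getD b 0) (b + 1)) (c + 1) := by
  conv_lhs => rw [segCount]
  exact dif_pos h

theorem segCount_neg (pre : List Int) (n : Nat) (maxW : Int) (b : Nat) (c : Int)
    (h : ¬ b < n) :
    segCount pre n maxW b c = c := by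
  conv_lhs => rw [segCount]
  exact dif_neg h

theorem buildPrefixAux_getD (gs : List Int) :
    ∀ (s : Int) (k : Nat), k < gs.length →
    (buildPrefixAux gs s).getD k 0 = s + (gs.take (k + 1)).sum := by
  induction gs with
  | nil => intro s k hk; simp at hk
  | cons g gs ih =>
    intro s k hk
    cases k with
    | zero => simp [buildPrefixAux]
    | succ k =>
      simp only [buildPrefixAux, List.getD_cons_succ, List.take_succ_cons, List.sum_cons]
      rw [ih (s + g) k (by simpa using hk)]
      ring

theorem prefixList_getD (gifts : List Int) (k : Nat) (hk : k ≤ gifts.length) :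
    (prefixList gifts).getD k 0 = (gifts.take k).sum := by
  cases k with
  | zero => simp [prefixList]
  | succ k =>
    simp only [prefixList, List.getD_cons_succ]
    rw [buildPrefixAux_getD gifts 0 k (by omega)]
    simp

theorem prefixList_succ (gifts : List Int) (k : Nat) (hk : k < gifts.length) :
    (prefixList gifts).getD (k + 1) 0 =
      (prefixList gifts).getD k 0 + gifts.getD k 0 := by
  rw [prefixList_getD gifts (k + 1) (by omega), prefixList_getD gifts k (by omega)]
  rw [List.take_add_one, List.sum_append]
  rw [List.getD_eq_getElem?_getD]
  simp [List.getElem?_eq_getElem hk]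

theorem loop_eq_segCount (gifts : List Int) (maxW : Int)
    (hall : ∀ g ∈ gifts, g ≤ maxW) :
    ∀ (m k : Nat) (pb s : Int), gifts.length - k = m → k ≤ gifts.length →
    (prefixList gifts).getD k 0 - pb ≤ maxW →
    packGiftsLoop maxW (gifts.drop k) s (maxW - ((prefixList gifts).getD k 0 - pb)) =
      some (segCount (prefixList gifts) gifts.length maxW (innerJ (prefixList gifts) gifts.length maxW pb k) s) := by
  intro m
  induction m with
  | zero =>
    intro k pb s hm hk _
    have hkn : k = gifts.length := by omega
    subst hkn
    rw [List.drop_length]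
    rw [innerJ_stop _ _ _ _ _ (by omega)]
    rw [segCount_neg _ _ _ _ _ (by omega)]
    rfl
  | succ m ih =>
    intro k pb s hm hk hfit
    have hkn : k < gifts.length := by omega
    have hdrop : gifts.drop k = gifts[k] :: gifts.drop (k + 1) :=
      List.drop_eq_getElem_cons hkn
    have hgk : gifts.getD k 0 = gifts[k] := by
      rw [List.getD_eq_getElem?_getD]; simp [List.getElem?_eq_getElem hkn]
    have hgle : gifts[k] ≤ maxW := hall _ (gifts.getElem_mem hkn)
    have hsucc := prefixList_succ gifts k hkn
    rw [hdrop]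
    simp only [packGiftsLoop]
    rw [if_neg (by omega)]
    by_cases hcase : (prefixList gifts).getD (k + 1) 0 - pb ≤ maxW
    · -- gift fits: inner while advances
      have hnot : ¬ gifts[k] > maxW - ((prefixList gifts).getD k 0 - pb) := by omega
      rw [if_neg hnot]
      have hrem : maxW - ((prefixList gifts).getD k 0 - pb) - gifts[k]
          = maxW - ((prefixList gifts).getD (k + 1) 0 - pb) := by omega
      rw [hrem]
      rw [ih (k + 1) pb s (by omega) (by omega) hcase]
      rw [innerJ_cont _ _ _ _ _ ⟨hkn, hcase⟩]
    · -- overflow: new segment starts at k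
      have hyes : gifts[k] > maxW - ((prefixList gifts).getD k 0 - pb) := by omega
      rw [if_pos hyes]
      have hfit' : (prefixList gifts).getD (k + 1) 0 - (prefixList gifts).getD k 0 ≤ maxW := by
        omega
      have hrem : maxW - gifts[k]
          = maxW - ((prefixList gifts).getD (k + 1) 0 - (prefixList gifts).getD k 0) := by omega
      rw [hrem]
      rw [ih (k + 1) ((prefixList gifts).getD k 0) (s + 1) (by omega) (by omega) hfit']
      rw [innerJ_stop _ _ _ _ _ (fun hc => hcase hc.2)]
      rw [segCount_pos _ _ _ _ _ hkn]

theorem pack_gifts_eq_alt (gifts : List Int) (maxWeight : Int) :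
    pack_gifts gifts maxWeight = pack_gifts_alt gifts maxWeight := by
  cases gifts with
  | nil =>
    simp only [pack_gifts, pack_gifts_alt, List.length_nil]
    rw [segCount_neg _ _ _ _ _ (by omega)]
    simp
  | cons g gs =>
    simp only [pack_gifts, List.length_cons]
    rw [if_neg (by omega)]
    by_cases hbad : ∃ x ∈ g :: gs, x > maxWeight
    · rw [packGiftsLoop_none maxWeight _ _ _ hbad]
      simp only [pack_gifts_alt]
      rw [if_pos (by simpa [List.any_eq_true] using hbad)]
    · have hall : ∀ x ∈ g :: gs, x ≤ maxWeight := by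
        intro x hx
        by_contra hc
        exact hbad ⟨x, hx, by omega⟩
      simp only [pack_gifts_alt]
      rw [if_neg (by
        simp only [List.any_eq_true, decide_eq_true_eq, not_exists, not_and, not_lt]
        intro x hx
        exact hall x hx)]
      have hg : g ≤ maxWeight := hall g (List.mem_cons_self ..)
      have h1 : (prefixList (g :: gs)).getD 1 0 = g := by
        rw [prefixList_getD _ 1 (by simp)]; simp
      simp only [packGiftsLoop]
      rw [if_neg (by omega), if_neg (by omega)]
      have := loop_eq_segCount (g :: gs) maxWeight hall gs.length 1 0 1
        (by simp) (by simp) (by rw [h1]; omega)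
      rw [List.drop_one, List.tail_cons] at this
      rw [h1] at this
      simp only [sub_zero] at this
      rw [this]
      rw [segCount_pos _ _ _ _ _ (by simp : 0 < (g :: gs).length)]
      simp [prefixList]

-- ===== VERDICT (by name: the statement is the Claim_ definition above) =====
theorem pack_gifts_spec : Claim_equal_pack_gifts := by
  intro gifts maxWeight _
  unfold Spec_pack_gifts
  exact pack_gifts_eq_alt gifts maxWeight
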